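-- pv_equiv track=rewrite | github.com/nOOne-is-hier/TIS | SWEA/1494.사랑의_카운슬러/1494.사랑의_카운슬러4.py | calculate_vector_sum
-- ===== SOURCE A (Python) =====
-- def calculate_vector_sum(coordinates, case, n):
--     vector_x, vector_y = 0, 0
--
--     for i in range(n):
--         if i in case:
--             vector_x += coordinates[i][0]
--             vector_y += coordinates[i][1]
--         else:
--             vector_x -= coordinates[i][0]
--             vector_y -= coordinates[i][1]
--
--     return vector_x ** 2 + vector_y ** 2
-- ===== SOURCE B (Python) =====
-- def calculate_vector_sum(coordinates, case, n):
--     # indices actually contributing positively: distinct case entries inside range(n)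
--     chosen = {c for c in case if 0 <= c < n}
--     total_x = total_y = 0
--     for i in range(n):
--         x, y = coordinates[i]
--         total_x += x
--         total_y += y
--     case_x = case_y = 0
--     for i in chosen:
--         x, y = coordinates[i]
--         case_x += x
--         case_y += y
--     # signed sum = case_sum - (total - case_sum) = 2*case_sum - total
--     return (2 * case_x - total_x) ** 2 + (2 * case_y - total_y) ** 2
-- ===== Notes on version B (the rewrite author's own statement) =====
-- stated objective: faster
-- what changed: B removes A's per-index linear membership scan 'i in case': it builds a hash set of the valid case indices once, sums all coordinates in one pass and sums the chosen coordinates by iterating the set, combining them via signed_sum = 2*case_sum - total_sum.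
import Mathlib
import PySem

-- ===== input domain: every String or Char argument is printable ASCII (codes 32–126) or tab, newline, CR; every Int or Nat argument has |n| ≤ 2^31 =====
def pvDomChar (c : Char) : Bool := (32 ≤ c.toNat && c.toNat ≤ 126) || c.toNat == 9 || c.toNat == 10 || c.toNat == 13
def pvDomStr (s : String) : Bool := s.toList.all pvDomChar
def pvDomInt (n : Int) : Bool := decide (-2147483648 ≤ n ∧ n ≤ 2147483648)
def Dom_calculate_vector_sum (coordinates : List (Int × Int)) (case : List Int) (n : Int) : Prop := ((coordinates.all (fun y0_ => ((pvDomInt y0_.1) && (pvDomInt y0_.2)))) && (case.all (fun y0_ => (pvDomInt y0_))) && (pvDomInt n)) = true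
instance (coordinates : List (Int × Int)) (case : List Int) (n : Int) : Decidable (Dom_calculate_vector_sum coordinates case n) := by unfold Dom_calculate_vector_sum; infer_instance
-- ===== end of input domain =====

-- B replaces A's per-index membership scan by a hash set of valid case indices plus two
-- staged sums combined via signed_sum = 2*case_sum - total_sum (objective: faster, O(n+|case|)).


-- ===== PORT A =====
-- A: one loop over range(n); add coordinates[i] when i ∈ case, else subtract it
def calculate_vector_sum (coordinates : List (Int × Int)) (case : List Int) (n : Int) : Int :=
  let v := (PySem.List.pyRange 0 n 1).foldl
    (fun v i =>
      let c := PySem.List.pyGetD coordinates i (0, 0)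
      if i ∈ case then (v.1 + c.1, v.2 + c.2) else (v.1 - c.1, v.2 - c.2))
    (0, 0)
  v.1 ^ 2 + v.2 ^ 2

-- ===== PORT B =====
-- B: the set of distinct case entries inside range(n)
def pvChosen (case : List Int) (n : Int) : PySem.Set Int :=
  PySem.Set.ofList (case.filter (fun c => decide (0 ≤ c ∧ c < n)))

def calculate_vector_sum_alt (coordinates : List (Int × Int)) (case : List Int) (n : Int) : Int :=
  let chosen := pvChosen case n
  let t := (PySem.List.pyRange 0 n 1).foldl
    (fun a i =>
      let c := PySem.List.pyGetD coordinates i (0, 0)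
      (a.1 + c.1, a.2 + c.2)) (0, 0)
  let s := chosen.foldl
    (fun a i =>
      let c := PySem.List.pyGetD coordinates i (0, 0)
      (a.1 + c.1, a.2 + c.2)) (0, 0)
  (2 * s.1 - t.1) ^ 2 + (2 * s.2 - t.2) ^ 2

-- ===== PRECONDITION & SPEC =====
-- Pre_ excludes only inputs where A raises IndexError: an index i with 0 ≤ i < n beyond coordinates
def Pre_calculate_vector_sum (coordinates : List (Int × Int)) (case : List Int) (n : Int) : Prop :=
  n ≤ (coordinates.length : Int)
instance (coordinates : List (Int × Int)) (case : List Int) (n : Int) : Decidable (Pre_calculate_vector_sum coordinates case n) := by unfold Pre_calculate_vector_sum; infer_instance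

def pvWitness_calculate_vector_sum : (List (Int × Int)) × List Int × Int := ([(1, 2), (-3, 4), (5, -6)], [0, 2], 3)

def Spec_calculate_vector_sum (coordinates : List (Int × Int)) (case : List Int) (n : Int) (out : Int) : Prop := out = calculate_vector_sum_alt coordinates case n
instance (coordinates : List (Int × Int)) (case : List Int) (n : Int) (out : Int) : Decidable (Spec_calculate_vector_sum coordinates case n out) := by unfold Spec_calculate_vector_sum; infer_instance

-- ===== CLAIM (what is proved, stated in full; the proofs are below) =====
def Claim_equal_calculate_vector_sum : Prop := ∀ (coordinates : List (Int × Int)) (case : List Int) (n : Int), Dom_calculate_vector_sum coordinates case n → Pre_calculate_vector_sum coordinates case n → Spec_calculate_vector_sum coordinates case n (calculate_vector_sum coordinates case n)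

-- ===== LEMMAS AND PROOFS =====

-- A's loop step, written with the ± folded into the added quantity (per component)
theorem pv_stepA_eq (coordinates : List (Int × Int)) (case : List Int) :
    (fun (v : Int × Int) (i : Int) =>
      let c := PySem.List.pyGetD coordinates i (0, 0)
      if i ∈ case then (v.1 + c.1, v.2 + c.2) else (v.1 - c.1, v.2 - c.2))
    = fun v i =>
      (v.1 + (if i ∈ case then (PySem.List.pyGetD coordinates i (0, 0)).1
              else -(PySem.List.pyGetD coordinates i (0, 0)).1),
       v.2 + (if i ∈ case then (PySem.List.pyGetD coordinates i (0, 0)).2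
              else -(PySem.List.pyGetD coordinates i (0, 0)).2)) := by
  funext v i
  by_cases h : i ∈ case <;> simp [h, Prod.ext_iff] <;> constructor <;> ring

-- A's signed per-element sum over any list, split into case part and total part
theorem pv_sum_split (case : List Int) (g : Int → Int) (l : List Int) :
    (l.map (fun i => if i ∈ case then g i else -g i)).sum
      = 2 * ((l.filter (fun i => decide (i ∈ case))).map g).sum - (l.map g).sum := by
  induction l with
  | nil => simp
  | cons i l ih =>
    by_cases h : i ∈ case <;> simp [List.filter_cons, h, ih] <;> ring

-- the filtered range and B's chosen set are permutations (same members, both nodup)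
theorem pv_perm (case : List Int) (n : Int) :
    ((PySem.List.pyRange 0 n 1).filter (fun i => decide (i ∈ case))).Perm (pvChosen case n) := by
  unfold pvChosen
  rw [List.perm_ext_iff_of_nodup
      (List.Nodup.filter _ (PySem.List.nodup_pyRange_one 0 n)) (PySem.Set.nodup_ofList _)]
  intro a
  simp [List.mem_filter, PySem.List.mem_pyRange_one, PySem.Set.mem_ofList]
  tauto

theorem pv_chosen_sum (case : List Int) (n : Int) (g : Int → Int) :
    (((PySem.List.pyRange 0 n 1).filter (fun i => decide (i ∈ case))).map g).sum
      = ((pvChosen case n).map g).sum := ((pv_perm case n).map g).sum_eq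

-- ===== VERDICT (by name: the statement is the Claim_ definition above) =====
theorem calculate_vector_sum_spec : Claim_equal_calculate_vector_sum := by
  intro coordinates case n _ _
  unfold Spec_calculate_vector_sum calculate_vector_sum calculate_vector_sum_alt
  simp only [pv_stepA_eq]
  rw [PySem.List.foldl_prod_mk
        (f := fun s i => s + (if i ∈ case then (PySem.List.pyGetD coordinates i (0, 0)).1
                              else -(PySem.List.pyGetD coordinates i (0, 0)).1))
        (g := fun s i => s + (if i ∈ case then (PySem.List.pyGetD coordinates i (0, 0)).2
                              else -(PySem.List.pyGetD coordinates i (0, 0)).2)),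
      PySem.List.foldl_prod_mk
        (f := fun s i => s + (PySem.List.pyGetD coordinates i (0, 0)).1)
        (g := fun s i => s + (PySem.List.pyGetD coordinates i (0, 0)).2),
      PySem.List.foldl_prod_mk
        (f := fun s i => s + (PySem.List.pyGetD coordinates i (0, 0)).1)
        (g := fun s i => s + (PySem.List.pyGetD coordinates i (0, 0)).2)]
  simp only [PySem.List.foldl_add, zero_add]
  rw [pv_sum_split case (fun i => (PySem.List.pyGetD coordinates i (0, 0)).1),
      pv_sum_split case (fun i => (PySem.List.pyGetD coordinates i (0, 0)).2),
      pv_chosen_sum case n (fun i => (PySem.List.pyGetD coordinates i (0, 0)).1),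
      pv_chosen_sum case n (fun i => (PySem.List.pyGetD coordinates i (0, 0)).2)]
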